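-- pv_equiv track=rewrite | github.com/contea95/1Day-1Commit-AlgorithmStudy | BOJ/Python/4673.셀프넘버/4673.py | self_num
-- ===== SOURCE A (Python) =====
-- def self_num(a):
--     sum_list = []
--     origin_num = a
--     while a > 0:
--         sum_list.append(a % 10)
--         a = a//10
--     result = origin_num + sum(sum_list)
--     return result
-- ===== SOURCE B (Python) =====
-- def digit_sum(n):
--     if n <= 0:
--         return 0
--     return n % 10 + digit_sum(n // 10)
--
-- def self_num(a):
--     return a + digit_sum(a)
-- ===== Notes on version B (the rewrite author's own statement) =====
-- stated objective: alternative
-- what changed: Replaces the while-loop that accumulates digits into a list and sums it afterwards by a direct recursive digit_sum helper that adds digits as it peels them.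
import Mathlib
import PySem

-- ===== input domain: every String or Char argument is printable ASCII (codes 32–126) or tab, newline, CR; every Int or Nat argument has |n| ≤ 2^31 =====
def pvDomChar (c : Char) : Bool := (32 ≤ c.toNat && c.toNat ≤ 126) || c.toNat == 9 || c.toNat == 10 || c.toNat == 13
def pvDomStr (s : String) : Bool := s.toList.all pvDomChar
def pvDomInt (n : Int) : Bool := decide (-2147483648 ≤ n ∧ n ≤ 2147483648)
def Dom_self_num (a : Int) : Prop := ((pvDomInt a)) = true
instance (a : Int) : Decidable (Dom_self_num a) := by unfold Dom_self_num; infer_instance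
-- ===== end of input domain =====

-- B changes the decomposition only: a recursive digit_sum adds digits as it peels them,
-- instead of A's while-loop collecting digits into a list summed afterwards; same cost.

-- ===== PORT A =====
-- the while-loop: appends a % 10 to sum_list and floor-divides a by 10 while a > 0
def selfNumLoop (a : Int) (sum_list : List Int) : List Int :=
  if a > 0 then selfNumLoop (PySem.Int.floordiv a 10) (sum_list ++ [PySem.Int.mod a 10])
  else sum_list
termination_by a.toNat
decreasing_by
  have h10 : PySem.Int.floordiv a 10 = a / 10 := by
    simp [PySem.Int.floordiv, Int.fdiv_eq_ediv]
  rw [h10]; omega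

def self_num (a : Int) : Int :=
  a + (selfNumLoop a []).sum

-- ===== PORT B =====
def digitSum (n : Int) : Int :=
  if n ≤ 0 then 0
  else PySem.Int.mod n 10 + digitSum (PySem.Int.floordiv n 10)
termination_by n.toNat
decreasing_by
  have h10 : PySem.Int.floordiv n 10 = n / 10 := by
    simp [PySem.Int.floordiv, Int.fdiv_eq_ediv]
  rw [h10]; omega

def self_num_alt (a : Int) : Int := a + digitSum a

-- ===== PRECONDITION & SPEC =====
def Spec_self_num (a : Int) (out : Int) : Prop := out = self_num_alt a
instance (a : Int) (out : Int) : Decidable (Spec_self_num a out) := by unfold Spec_self_num; infer_instance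

-- ===== CLAIM (what is proved, stated in full; the proofs are below) =====
def Claim_equal_self_num : Prop := ∀ (a : Int), Dom_self_num a → Spec_self_num a (self_num a)

-- ===== LEMMAS AND PROOFS =====
theorem selfNumLoop_sum (a : Int) (l : List Int) :
    (selfNumLoop a l).sum = l.sum + digitSum a := by
  induction a, l using selfNumLoop.induct with
  | case1 a l h ih =>
    rw [selfNumLoop, if_pos h, ih]
    conv_rhs => rw [digitSum, if_neg (by omega)]
    simp [List.sum_append]; ring
  | case2 a l h =>
    rw [selfNumLoop, if_neg h]
    conv_rhs => rw [digitSum, if_pos (by omega)]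
    simp

-- ===== VERDICT (by name: the statement is the Claim_ definition above) =====
theorem self_num_spec : Claim_equal_self_num := by
  intro a _
  unfold Spec_self_num self_num self_num_alt
  rw [selfNumLoop_sum]; simp
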